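-- pv_equiv track=rewrite | github.com/librola/XMUCS-24-SE-Final_Project | aglibro/util/postprocess_tests.py | parse_error_info_pytest
-- ===== SOURCE A (Python) =====
-- def parse_error_info_pytest(log_content: str):
--     # lines = log_content.split('\n')
--     # error_infos = [line[4: ] for line in lines if line.startswith('E   ')]
--     # error_info = "\n".join(error_infos)
--     # return error_info
--     lines = log_content.splitlines()
--
--     errors = []
--     current_error = []
--
--     for line in lines:
--         if line.startswith("E   "):
--             current_error.append(line)
--         else:
--             if current_error:
--                 errors.append("\n".join(current_error))
--                 current_error = []
--
--     if current_error:
--         errors.append("\n".join(current_error))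
--
--     return errors[0] if errors else ""
-- ===== SOURCE B (Python) =====
-- def _first_error_block(lines):
--     # staged: flag vector -> index arithmetic -> one slice; no accumulator loop
--     flags = [line.startswith("E   ") for line in lines]
--     if True not in flags:
--         return ""
--     start = flags.index(True)
--     tail = flags[start:]
--     length = tail.index(False) if False in tail else len(tail)
--     return "\n".join(lines[start:start + length])
--
-- def parse_error_info_pytest(log_content: str):
--     return _first_error_block(log_content.splitlines())
-- ===== Notes on version B (the rewrite author's own statement) =====
-- stated objective: alternative
-- what changed: Replaces A's single-pass accumulate-all-blocks-then-index-0 state machine with staged index arithmetic: compute a boolean flag vector, locate the block's start with list.index(True) and its length with index(False) on the tail, and return the join of one slice.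
import Mathlib
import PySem

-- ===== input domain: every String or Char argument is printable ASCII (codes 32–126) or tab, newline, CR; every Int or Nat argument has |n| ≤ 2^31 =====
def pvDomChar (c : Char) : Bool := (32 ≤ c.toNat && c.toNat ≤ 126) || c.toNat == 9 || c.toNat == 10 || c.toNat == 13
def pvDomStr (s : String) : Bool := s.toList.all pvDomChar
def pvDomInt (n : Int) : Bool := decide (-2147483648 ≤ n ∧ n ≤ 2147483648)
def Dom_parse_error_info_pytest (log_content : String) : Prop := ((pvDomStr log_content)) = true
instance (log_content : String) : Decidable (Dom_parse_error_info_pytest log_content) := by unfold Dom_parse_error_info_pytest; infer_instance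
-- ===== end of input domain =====

-- B replaces A's accumulate-all-blocks-then-take-index-0 loop with staged index arithmetic:
-- a flag vector, list.index to find the block's start and length, and one slice; same O(n) cost.


-- ===== PORT A =====
-- A's loop over the lines; state (errors, current_error); the trailing 'if current_error' flush
-- is the base case of the recursion.
def pyA_loop (lines : List String) (errors current : List String) : List String :=
  match lines with
  | [] => if current.isEmpty then errors else errors ++ [PySem.Str.join "\n" current]
  | l :: ls =>
    if PySem.Str.startswith l "E   " then
      pyA_loop ls errors (current ++ [l])
    else
      if current.isEmpty then pyA_loop ls errors current
      else pyA_loop ls (errors ++ [PySem.Str.join "\n" current]) []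

def parse_error_info_pytest (log_content : String) : String :=
  match pyA_loop (PySem.Str.splitlines log_content) [] [] with
  | [] => ""
  | e :: _ => e

-- ===== PORT B =====
-- _first_error_block: flags = [line.startswith("E   ") for line in lines]; if True not in flags
-- return ""; start = flags.index(True); tail = flags[start:]; length = tail.index(False) if
-- False in tail else len(tail); return "\n".join(lines[start:start+length]).
-- (.getD 0 ports list.index, which is guaranteed to succeed by the membership test just before.)
def pyB_first_error_block (lines : List String) : String :=
  let flags := lines.map (fun line => PySem.Str.startswith line "E   ")
  if true ∈ flags then
    let start := (PySem.List.index? flags true).getD 0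
    let tail := PySem.List.slice flags (some (start : Int)) none
    let length := if false ∈ tail then (PySem.List.index? tail false).getD 0 else tail.length
    PySem.Str.join "\n" (PySem.List.slice lines (some (start : Int)) (some ((start : Int) + (length : Int))))
  else ""

def parse_error_info_pytest_alt (log_content : String) : String :=
  pyB_first_error_block (PySem.Str.splitlines log_content)

-- ===== PRECONDITION & SPEC =====
def Spec_parse_error_info_pytest (log_content : String) (out : String) : Prop := out = parse_error_info_pytest_alt log_content
instance (log_content : String) (out : String) : Decidable (Spec_parse_error_info_pytest log_content out) := by unfold Spec_parse_error_info_pytest; infer_instance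

-- ===== CLAIM (what is proved, stated in full; the proofs are below) =====
def Claim_equal_parse_error_info_pytest : Prop := ∀ (log_content : String), Dom_parse_error_info_pytest log_content → Spec_parse_error_info_pytest log_content (parse_error_info_pytest log_content)

-- ===== LEMMAS AND PROOFS =====

-- common characterisation: skip to the first "E   " line, join it with the following run
def firstBlock : List String → String
  | [] => ""
  | l :: ls =>
    if PySem.Str.startswith l "E   " then
      PySem.Str.join "\n" (l :: ls.takeWhile (fun x => PySem.Str.startswith x "E   "))
    else firstBlock ls

-- errors is only ever appended to
theorem pyA_loop_append (ls : List String) : ∀ errors current,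
    pyA_loop ls errors current = errors ++ pyA_loop ls [] current := by
  induction ls with
  | nil =>
    intro errors current
    simp [pyA_loop]; split_ifs <;> simp
  | cons l ls ih =>
    intro errors current
    simp only [pyA_loop]
    split_ifs with h1 h2
    · rw [ih errors, ih []]
    · rw [ih errors, ih []]
    · rw [ih (errors ++ _), ih ([] ++ [PySem.Str.join "\n" current])]
      simp

-- with a nonempty current block, the first produced error block is current ++ the run of "E   " lines
theorem pyA_loop_head (ls : List String) : ∀ current, current ≠ [] →
    ∃ rest, pyA_loop ls [] current =
      PySem.Str.join "\n" (current ++ ls.takeWhile (fun x => PySem.Str.startswith x "E   ")) :: rest := by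
  induction ls with
  | nil =>
    intro current hc
    refine ⟨[], ?_⟩
    simp [pyA_loop, List.isEmpty_iff, hc]
  | cons l ls ih =>
    intro current hc
    by_cases h1 : PySem.Str.startswith l "E   " = true
    · obtain ⟨rest, hr⟩ := ih (current ++ [l]) (by simp)
      refine ⟨rest, ?_⟩
      rw [List.takeWhile_cons_of_pos (p := fun x => PySem.Str.startswith x "E   ") h1]
      simp only [pyA_loop, h1, if_true]
      simpa using hr
    · refine ⟨pyA_loop ls [] [], ?_⟩
      rw [List.takeWhile_cons_of_neg (p := fun x => PySem.Str.startswith x "E   ") (by simpa using h1)]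
      simp only [pyA_loop, h1]
      simp [List.isEmpty_iff, hc, pyA_loop_append ls [PySem.Str.join "\n" current]]

theorem A_eq_firstBlock (ls : List String) :
    (match pyA_loop ls [] [] with | [] => "" | e :: _ => e) = firstBlock ls := by
  induction ls with
  | nil => simp [pyA_loop, firstBlock]
  | cons l ls ih =>
    simp only [pyA_loop, firstBlock, List.isEmpty_nil, if_true]
    split_ifs with h1
    · obtain ⟨rest, hr⟩ := pyA_loop_head ls [l] (by simp)
      simp [hr]
    · exact ih

-- take up to the first 'false' flag = takeWhile the predicate
theorem take_firstFalse (f : String → Bool) (lines : List String) :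
    lines.take (if false ∈ lines.map f then (PySem.List.index? (lines.map f) false).getD 0
                else (lines.map f).length) = lines.takeWhile f := by
  induction lines with
  | nil => simp
  | cons l ls ih =>
    by_cases hl : f l = true
    · by_cases hm : false ∈ ls.map f
      · have hcond : false ∈ (l :: ls).map f := by simp [hm]
        obtain ⟨k, hk⟩ := Option.isSome_iff_exists.mp
          ((PySem.List.index?_isSome_iff (xs := ls.map f) (v := false)).mpr hm)
        have hidx : PySem.List.index? ((l :: ls).map f) false = some (k + 1) := by
          rw [List.map_cons, hl, PySem.List.index?_cons_of_ne _ (by simp), hk]; rfl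
        rw [if_pos hcond, hidx, Option.getD_some, List.take_succ_cons,
          List.takeWhile_cons_of_pos hl]
        have h2 := ih
        rw [if_pos hm, hk, Option.getD_some] at h2
        rw [h2]
      · have hcond : ¬ false ∈ (l :: ls).map f := by simp [hl, hm]
        rw [if_neg hcond, List.map_cons, List.length_cons, List.take_succ_cons,
          List.takeWhile_cons_of_pos hl]
        have h2 := ih
        rw [if_neg hm, List.length_map] at h2
        rw [List.length_map, h2]
    · have hlf : f l = false := by revert hl; cases f l <;> simp
      have hcond : false ∈ (l :: ls).map f := by simp [hlf]
      have hidx : PySem.List.index? ((l :: ls).map f) false = some 0 := by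
        rw [List.map_cons, hlf]; exact PySem.List.index?_cons_self _ _
      rw [if_pos hcond, hidx, Option.getD_some, List.take_zero,
        List.takeWhile_cons_of_neg (by simp [hlf])]

theorem B_eq_firstBlock (lines : List String) :
    pyB_first_error_block lines = firstBlock lines := by
  induction lines with
  | nil => simp [pyB_first_error_block, firstBlock]
  | cons l ls ih =>
    by_cases hl : PySem.Str.startswith l "E   " = true
    · -- start = 0, tail = the whole flag vector, the slice is a take
      have hmem : true ∈ (l :: ls).map (fun line => PySem.Str.startswith line "E   ") := by
        rw [List.map_cons, hl]; exact List.mem_cons_self ..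
      have hidx : PySem.List.index? ((l :: ls).map (fun line => PySem.Str.startswith line "E   ")) true = some 0 := by
        rw [List.map_cons, hl]; exact PySem.List.index?_cons_self _ _
      simp only [pyB_first_error_block, firstBlock, hl, if_pos hmem, hidx, Option.getD_some,
        Nat.cast_zero, PySem.List.slice_zero_start, PySem.List.slice_none_none, zero_add,
        PySem.List.slice_to_natCast, if_true]
      have ht := take_firstFalse (fun line => PySem.Str.startswith line "E   ") (l :: ls)
      rw [ht, List.takeWhile_cons_of_pos (p := fun line => PySem.Str.startswith line "E   ") hl]
    · have hlf : PySem.Str.startswith l "E   " = false := by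
        revert hl; cases PySem.Str.startswith l "E   " <;> simp
      have hfb : firstBlock (l :: ls) = firstBlock ls := by
        simp only [firstBlock]; rw [hlf]; simp
      rw [hfb, ← ih]
      by_cases hm : true ∈ ls.map (fun line => PySem.Str.startswith line "E   ")
      · have hmc : true ∈ (l :: ls).map (fun line => PySem.Str.startswith line "E   ") := by
          rw [List.map_cons]; exact List.mem_cons_of_mem _ hm
        obtain ⟨s, hs⟩ := Option.isSome_iff_exists.mp
          ((PySem.List.index?_isSome_iff
            (xs := ls.map (fun line => PySem.Str.startswith line "E   ")) (v := true)).mpr hm)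
        have hidx : PySem.List.index? ((l :: ls).map (fun line => PySem.Str.startswith line "E   ")) true = some (s + 1) := by
          rw [List.map_cons, hlf, PySem.List.index?_cons_of_ne _ (by simp), hs]; rfl
        have htail : PySem.List.slice ((l :: ls).map (fun line => PySem.Str.startswith line "E   "))
            (some ((s + 1 : Nat) : Int)) none
            = PySem.List.slice (ls.map (fun line => PySem.Str.startswith line "E   "))
            (some ((s : Nat) : Int)) none := by
          rw [PySem.List.slice_from_natCast, PySem.List.slice_from_natCast, List.map_cons,
            List.drop_succ_cons]
        have hsl : ∀ n : Nat, PySem.List.slice (l :: ls) (some ((s + 1 : Nat) : Int))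
            (some (((s + 1 : Nat) : Int) + (n : Int)))
            = PySem.List.slice ls (some ((s : Nat) : Int)) (some (((s : Nat) : Int) + (n : Int))) := by
          intro n
          rw [PySem.List.slice_natCast_add, PySem.List.slice_natCast_add, List.drop_succ_cons]
        simp only [pyB_first_error_block]
        rw [if_pos hmc, if_pos hm, hidx, hs, Option.getD_some, Option.getD_some, htail, hsl]
      · have hmc : ¬ true ∈ (l :: ls).map (fun line => PySem.Str.startswith line "E   ") := by
          rw [List.map_cons, hlf]
          intro h
          rcases List.mem_cons.mp h with h | h
          · exact (by cases h)
          · exact hm h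
        simp only [pyB_first_error_block]
        rw [if_neg hmc, if_neg hm]

-- ===== VERDICT (by name: the statement is the Claim_ definition above) =====
theorem parse_error_info_pytest_spec : Claim_equal_parse_error_info_pytest := by
  intro log_content _
  unfold Spec_parse_error_info_pytest parse_error_info_pytest parse_error_info_pytest_alt
  rw [B_eq_firstBlock]
  exact A_eq_firstBlock _
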